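-- pv_equiv track=rewrite | github.com/alishalopes87/hb-coding-challenges | hacker.py | AnagramPalindrome
-- ===== SOURCE A (Python) =====
-- def AnagramPalindrome(word):
--
--     count = {}
--     if len(word) == 2 and word[0] != word[1]:
--         return False
--
--     for char in word:
--         if char in count:
--             count[char] += 1
--         else:
--             count[char] = 1
--
--     odd = 0
--     for char in count:
--         if count[char] % 2 != 0:
--             odd += 1
--         if odd > 1:
--             return False
--
--
--     return True
-- ===== SOURCE B (Python) =====
-- def AnagramPalindrome(word):
--     odd = set()
--     for char in word:
--         if char in odd:
--             odd.remove(char)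
--         else:
--             odd.add(char)
--     return len(odd) <= 1
-- ===== Notes on version B (the rewrite author's own statement) =====
-- stated objective: idiomatic
-- what changed: Replaces the frequency dictionary plus a second scan over its keys (and the redundant length-2 guard) with a single pass maintaining a set of characters seen an odd number of times; the answer is just whether that set has at most one element.
import Mathlib
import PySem

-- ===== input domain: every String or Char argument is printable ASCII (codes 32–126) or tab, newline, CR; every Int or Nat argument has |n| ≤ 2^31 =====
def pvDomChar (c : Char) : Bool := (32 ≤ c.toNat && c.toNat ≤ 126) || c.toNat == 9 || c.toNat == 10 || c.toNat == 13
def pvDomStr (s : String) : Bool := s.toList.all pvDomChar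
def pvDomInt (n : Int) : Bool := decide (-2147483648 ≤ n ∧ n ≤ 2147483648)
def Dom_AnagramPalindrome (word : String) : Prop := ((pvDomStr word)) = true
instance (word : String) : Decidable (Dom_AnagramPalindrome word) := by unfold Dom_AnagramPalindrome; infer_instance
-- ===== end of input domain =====

-- B replaces A's frequency dict + second scan over keys by one pass maintaining a set of odd-count
-- characters (objective: idiomatic single pass; same asymptotic cost).

-- ===== PORT A =====
-- the second loop: 'for char in count: …' with the early 'return False' once odd > 1
def aOdd (d : PySem.Dict Char Int) : List Char → Int → Bool
  | [], _ => true
  | c :: rest, odd =>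
    let odd' := if PySem.Int.mod (d.getD c 0) 2 ≠ 0 then odd + 1 else odd
    if odd' > 1 then false else aOdd d rest odd'

def AnagramPalindrome (word : String) : Bool :=
  let cs := word.toList
  if cs.length == 2 && (PySem.List.pyGet? cs 0 != PySem.List.pyGet? cs 1) then false
  else
    let count := cs.foldl (fun d c => if d.contains c then d.modify c 0 (· + 1) else d.insert c 1) PySem.Dict.empty
    aOdd count count.keys 0

-- ===== PORT B =====
-- 'odd.remove(char)' fires only when 'char in odd', where remove = discard
def AnagramPalindrome_alt (word : String) : Bool :=
  let odd := word.toList.foldl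
    (fun s c => if PySem.Set.contains s c then PySem.Set.discard s c else PySem.Set.add s c)
    PySem.Set.empty
  decide (PySem.Set.len odd ≤ 1)

-- ===== PRECONDITION & SPEC =====
def Spec_AnagramPalindrome (word : String) (out : Bool) : Prop := out = AnagramPalindrome_alt word
instance (word : String) (out : Bool) : Decidable (Spec_AnagramPalindrome word out) := by unfold Spec_AnagramPalindrome; infer_instance

-- ===== CLAIM (what is proved, stated in full; the proofs are below) =====
def Claim_equal_AnagramPalindrome : Prop := ∀ (word : String), Dom_AnagramPalindrome word → Spec_AnagramPalindrome word (AnagramPalindrome word)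

-- ===== LEMMAS AND PROOFS =====

-- A's building loop is exactly Counter(word)
theorem aCount_eq_counter (cs : List Char) :
    cs.foldl (fun d c => if d.contains c then d.modify c 0 (· + 1) else d.insert c 1) PySem.Dict.empty
      = PySem.Dict.counter cs := by
  rw [PySem.Dict.counter_eq_foldl]
  have hstep : (fun (d : PySem.Dict Char Int) (c : Char) => if d.contains c then d.modify c 0 (· + 1) else d.insert c 1)
      = (fun (d : PySem.Dict Char Int) (c : Char) => d.modify c 0 (· + 1)) := by
    funext d c
    by_cases h : d.contains c = true
    · rw [if_pos h]
    · rw [if_neg h, PySem.Dict.modify,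
        PySem.Dict.getD_of_not_contains d 0 (by simpa using h)]
      norm_num
  rw [hstep]

-- early-exit count of odd values
theorem aOdd_eq (d : PySem.Dict Char Int) (l : List Char) (odd : Int)
    (h0 : 0 ≤ odd) (h1 : odd ≤ 1) :
    aOdd d l odd = decide (odd + (l.countP (fun c => decide (PySem.Int.mod (d.getD c 0) 2 ≠ 0)) : Int) ≤ 1) := by
  induction l generalizing odd with
  | nil =>
    have : odd ≤ 1 := h1
    simp only [aOdd, List.countP_nil, Nat.cast_zero, add_zero]
    exact (decide_eq_true this).symm
  | cons c rest ih =>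
    rw [show aOdd d (c :: rest) odd =
        (if (if PySem.Int.mod (d.getD c 0) 2 ≠ 0 then odd + 1 else odd) > 1 then false
         else aOdd d rest (if PySem.Int.mod (d.getD c 0) 2 ≠ 0 then odd + 1 else odd)) from rfl,
      List.countP_cons]
    by_cases hp : PySem.Int.mod (d.getD c 0) 2 ≠ 0
    · rw [if_pos hp, decide_eq_true hp, if_pos rfl]
      by_cases hgt : odd + 1 > 1
      · rw [if_pos hgt]
        symm
        rw [decide_eq_false_iff_not]
        push_cast
        omega
      · rw [if_neg hgt, ih (odd + 1) (by omega) (by omega), decide_eq_decide]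
        push_cast
        omega
    · rw [if_neg hp, decide_eq_false hp, if_neg Bool.false_ne_true]
      have hgt : ¬ odd > 1 := by omega
      rw [if_neg hgt, ih odd h0 h1, decide_eq_decide]
      push_cast
      omega

def bStep (s : PySem.Set Char) (c : Char) : PySem.Set Char :=
  if PySem.Set.contains s c then PySem.Set.discard s c else PySem.Set.add s c

theorem bStep_pos (s : PySem.Set Char) (c : Char) (hc : PySem.Set.contains s c = true) :
    bStep s c = List.filter (fun y => !y == c) s := by
  unfold bStep
  rw [if_pos hc, PySem.Set.discard]

theorem bStep_neg (s : PySem.Set Char) (c : Char) (hc : ¬ PySem.Set.contains s c = true) :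
    bStep s c = s ++ [c] := by
  unfold bStep
  rw [if_neg hc, PySem.Set.add, if_neg hc]

-- invariant of B's single pass: membership in the set is parity of the count so far
theorem bFold_inv (l : List Char) (s : PySem.Set Char) (hs : List.Nodup s) :
    List.Nodup (l.foldl bStep s) ∧
      ∀ c : Char, c ∈ l.foldl bStep s ↔ ((c ∈ s) ↔ ¬ (l.count c % 2 = 1)) := by
  induction l generalizing s with
  | nil => exact ⟨hs, by simp⟩
  | cons a rest ih =>
    by_cases hc : PySem.Set.contains s a = true
    · have hstep : bStep s a = List.filter (fun y => !y == a) s := bStep_pos s a hc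
      have hnd : List.Nodup (List.filter (fun y => !y == a) s) := hs.filter _
      obtain ⟨h1, h2⟩ := ih _ hnd
      rw [List.foldl_cons, hstep]
      refine ⟨h1, fun c => ?_⟩
      rw [h2 c, List.mem_filter, List.count_cons]
      have hmem : a ∈ s := by simpa [PySem.Set.contains] using hc
      by_cases hca : c = a
      · subst hca; simp [hmem]; omega
      · simp [hca, Ne.symm hca]
    · have hstep : bStep s a = s ++ [a] := bStep_neg s a hc
      have hna : a ∉ s := by simpa [PySem.Set.contains] using hc
      have hnd : List.Nodup (s ++ [a]) := by
        simp only [List.nodup_append, List.nodup_singleton]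
        refine ⟨hs, trivial, ?_⟩
        intro x hx y hy hxy
        subst hxy
        have hxa : x = a := by simpa using hy
        exact hna (hxa ▸ hx)
      obtain ⟨h1, h2⟩ := ih _ hnd
      rw [List.foldl_cons, hstep]
      refine ⟨h1, fun c => ?_⟩
      rw [h2 c, List.mem_append, List.count_cons]
      by_cases hca : c = a
      · subst hca; simp [hna]; omega
      · simp [hca, Ne.symm hca]

-- B's odd set is a permutation of the odd-count distinct characters
theorem odd_set_perm (cs : List Char) :
    (cs.foldl bStep PySem.Set.empty).Perm
      ((PySem.Set.ofList cs).filter (fun c => decide (cs.count c % 2 = 1))) := by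
  obtain ⟨hnd, hmem⟩ := bFold_inv cs PySem.Set.empty List.nodup_nil
  rw [List.perm_ext_iff_of_nodup hnd ((PySem.Set.nodup_ofList cs).filter _)]
  intro c
  rw [List.mem_filter, PySem.Set.mem_ofList, hmem c]
  constructor
  · intro h
    have hodd : cs.count c % 2 = 1 := by simpa using h
    exact ⟨List.count_pos_iff.mp (by omega), by simpa using hodd⟩
  · intro ⟨_, h⟩
    simp at h ⊢
    omega

-- the two predicates agree on characters of the word
theorem pred_congr (cs : List Char) (c : Char) (_hc : c ∈ PySem.Set.ofList cs) :
    (decide (PySem.Int.mod ((PySem.Dict.counter cs).getD c 0) 2 ≠ 0))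
      = (decide (cs.count c % 2 = 1)) := by
  rw [PySem.Dict.getD_counter, PySem.Int.mod_eq_emod_of_pos (by norm_num)]
  simp only [decide_eq_decide]
  omega

-- ===== VERDICT (by name: the statement is the Claim_ definition above) =====
theorem AnagramPalindrome_spec : Claim_equal_AnagramPalindrome := by
  intro word _
  unfold Spec_AnagramPalindrome AnagramPalindrome AnagramPalindrome_alt
  set cs := word.toList with hcs
  rw [show (fun (s : PySem.Set Char) (c : Char) => if PySem.Set.contains s c then PySem.Set.discard s c else PySem.Set.add s c) = bStep from rfl]
  by_cases hg : (cs.length == 2 && (PySem.List.pyGet? cs 0 != PySem.List.pyGet? cs 1)) = true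
  · -- A's special guard: |word| = 2 with distinct letters; B's odd set is the two letters
    simp only [hg, if_true]
    obtain ⟨hlen, hne⟩ := by simpa using hg
    match cs, hlen with
    | [a, b], _ =>
      have hab : a ≠ b := by
        simp [PySem.List.pyGet?, PySem.List.pyIdx?] at hne
        exact hne
      have hperm := odd_set_perm [a, b]
      have hof : PySem.Set.ofList [a, b] = [a, b] :=
        PySem.Set.ofList_eq_self_of_nodup [a, b] (by simp [hab])
      have hca : List.count a [a, b] = 1 := by simp [hab]
      have hcb : List.count b [a, b] = 1 := by simp [hab]
      rw [hof] at hperm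
      have hlen2 : ([a, b].foldl bStep PySem.Set.empty).length = 2 := by
        rw [hperm.length_eq]
        simp [hca, hcb]
      simp only [PySem.Set.len, hlen2]
      norm_num
  · rw [if_neg hg, aCount_eq_counter, aOdd_eq _ _ 0 le_rfl (by norm_num),
      PySem.Dict.keys_counter,
      List.countP_congr (fun c hc => by rw [pred_congr cs c hc]),
      List.countP_eq_length_filter, ← (odd_set_perm cs).length_eq]
    simp only [PySem.Set.len]
    rw [decide_eq_decide]
    omega
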